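-- pv_equiv track=rewrite | github.com/mpast043/host-adapters-experimental-data | experiments/physics/exp2_mera_tradeoff/exp2b_asymptotic.py | create_mera_1d
-- ===== SOURCE A (Python) =====
-- from typing import Dict, List
--
-- def create_mera_1d(n_sites: int, chi: int) -> Dict:
--     """Simple MERA representation."""
--     bond_dims = []
--     phys_dims = [2] * n_sites
--
--     current_sites = n_sites
--     level = 0
--
--     while current_sites >= 2:
--         n_pairs = current_sites // 2
--         for _ in range(n_pairs):
--             bond_dims.append(chi * chi)  # disentangler
--             bond_dims.extend([chi, chi, chi])  # isometry bonds
--         current_sites = n_pairs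
--         level += 1
--
--     C_geo = sum(phys_dims)
--     C_int = sum(bond_dims)
--
--     return {'C_geo': C_geo, 'C_int': C_int, 'C_total': C_geo + C_int, 'depth': level}
-- ===== SOURCE B (Python) =====
-- def create_mera_1d(n_sites: int, chi: int):
--     """Simple MERA representation (closed-form cost accumulation, no bond list)."""
--     c_geo = 2 * max(n_sites, 0)
--     per_pair = chi * chi + 3 * chi  # disentangler + three isometry bonds
--     pairs = 0
--     depth = 0
--     cur = n_sites
--     while cur >= 2:
--         cur //= 2
--         pairs += cur
--         depth += 1
--     c_int = pairs * per_pair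
--     return {'C_geo': c_geo, 'C_int': c_int, 'C_total': c_geo + c_int, 'depth': depth}
-- ===== Notes on version B (the rewrite author's own statement) =====
-- stated objective: faster
-- what changed: B never builds the O(n) bond_dims list or the [2]*n phys list: it counts pairs per level in an O(log n) halving loop and multiplies once by the per-pair cost chi^2+3*chi, with C_geo = 2*max(n,0) in closed form.
import Mathlib
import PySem

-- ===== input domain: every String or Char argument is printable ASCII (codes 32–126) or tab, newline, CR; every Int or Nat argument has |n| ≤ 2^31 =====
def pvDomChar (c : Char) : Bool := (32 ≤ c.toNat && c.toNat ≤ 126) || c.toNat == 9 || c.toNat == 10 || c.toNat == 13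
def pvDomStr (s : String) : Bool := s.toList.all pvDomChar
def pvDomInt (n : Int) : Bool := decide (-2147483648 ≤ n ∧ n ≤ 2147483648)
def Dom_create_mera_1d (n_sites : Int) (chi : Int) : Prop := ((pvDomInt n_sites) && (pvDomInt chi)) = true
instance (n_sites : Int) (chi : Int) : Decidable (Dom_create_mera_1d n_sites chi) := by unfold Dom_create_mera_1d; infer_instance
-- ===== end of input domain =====

-- B replaces A's O(n) bond_dims list construction by an O(log n) per-level pair count
-- times the per-pair cost chi^2+3*chi (return-value equivalence; no mutation involved).

-- ===== PORT A =====
-- while current_sites >= 2: inner for-loop appends chi*chi then extends [chi,chi,chi] per pair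
def aLoop (chi : Int) (current_sites : Int) (bond_dims : List Int) (level : Int) :
    List Int × Int :=
  if h : current_sites ≥ 2 then
    let n_pairs := PySem.Int.floordiv current_sites 2
    let bonds := (PySem.List.pyRange 0 n_pairs 1).foldl
      (fun acc _ => acc ++ [chi * chi, chi, chi, chi]) bond_dims
    aLoop chi n_pairs bonds (level + 1)
  else (bond_dims, level)
termination_by current_sites.toNat
decreasing_by
  rw [PySem.Int.floordiv_eq_ediv_of_pos (by omega)]
  omega

def create_mera_1d (n_sites : Int) (chi : Int) : List (String × Int) :=
  let phys_dims : List Int := List.replicate n_sites.toNat 2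
  let res := aLoop chi n_sites [] 0
  let C_geo := phys_dims.sum
  let C_int := res.1.sum
  [("C_geo", C_geo), ("C_int", C_int), ("C_total", C_geo + C_int), ("depth", res.2)]

-- ===== PORT B =====
def bLoop (cur : Int) (pairs : Int) (depth : Int) : Int × Int :=
  if h : cur ≥ 2 then
    let c := PySem.Int.floordiv cur 2
    bLoop c (pairs + c) (depth + 1)
  else (pairs, depth)
termination_by cur.toNat
decreasing_by
  rw [PySem.Int.floordiv_eq_ediv_of_pos (by omega)]
  omega

def create_mera_1d_alt (n_sites : Int) (chi : Int) : List (String × Int) :=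
  let c_geo := 2 * max n_sites 0
  let per_pair := chi * chi + 3 * chi
  let res := bLoop n_sites 0 0
  let c_int := res.1 * per_pair
  [("C_geo", c_geo), ("C_int", c_int), ("C_total", c_geo + c_int), ("depth", res.2)]

-- ===== PRECONDITION & SPEC =====
def Spec_create_mera_1d (n_sites : Int) (chi : Int) (out : List (String × Int)) : Prop := out = create_mera_1d_alt n_sites chi
instance (n_sites : Int) (chi : Int) (out : List (String × Int)) : Decidable (Spec_create_mera_1d n_sites chi out) := by unfold Spec_create_mera_1d; infer_instance

-- ===== CLAIM (what is proved, stated in full; the proofs are below) =====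
def Claim_equal_create_mera_1d : Prop := ∀ (n_sites : Int) (chi : Int), Dom_create_mera_1d n_sites chi → Spec_create_mera_1d n_sites chi (create_mera_1d n_sites chi)

-- ===== LEMMAS AND PROOFS =====
-- folding "append 4 bonds" over a list sums to length * (sum of the 4 bonds)
theorem foldl_append4_sum (a b c d : Int) :
    ∀ (l : List Int) (init : List Int),
      (l.foldl (fun acc _ => acc ++ [a, b, c, d]) init).sum
        = init.sum + l.length * (a + b + c + d) := by
  intro l
  induction l with
  | nil => intro init; simp
  | cons x xs ih =>
      intro init
      simp only [List.foldl_cons, ih, List.sum_append, List.length_cons,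
        List.sum_cons, List.sum_nil]
      push_cast
      ring

-- the two loops agree: A's bond sum is B's pair count times chi^2+3*chi, and depths match
theorem loop_eq (chi : Int) (cur : Int) :
    ∀ (bonds : List Int) (lvl pairs depth : Int),
      bonds.sum = pairs * (chi * chi + 3 * chi) → lvl = depth →
      (aLoop chi cur bonds lvl).1.sum = (bLoop cur pairs depth).1 * (chi * chi + 3 * chi) ∧
      (aLoop chi cur bonds lvl).2 = (bLoop cur pairs depth).2 := by
  intro bonds lvl pairs depth hsum hl
  rw [aLoop, bLoop]
  split
  · next h =>
    have hc : (1 : Int) ≤ PySem.Int.floordiv cur 2 := by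
      rw [PySem.Int.floordiv_eq_ediv_of_pos (by omega)]; omega
    refine loop_eq chi (PySem.Int.floordiv cur 2) _ _ _ _ ?_ (by omega)
    rw [foldl_append4_sum, PySem.List.length_pyRange_one, hsum]
    have : ((PySem.Int.floordiv cur 2 - 0).toNat : Int) = PySem.Int.floordiv cur 2 := by
      omega
    rw [this]
    ring
  · exact ⟨by rw [hsum], hl⟩
termination_by cur.toNat
decreasing_by
  rw [PySem.Int.floordiv_eq_ediv_of_pos (by omega)]
  omega

-- ===== VERDICT (by name: the statement is the Claim_ definition above) =====
theorem create_mera_1d_spec : Claim_equal_create_mera_1d := by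
  intro n chi _
  unfold Spec_create_mera_1d create_mera_1d create_mera_1d_alt
  obtain ⟨h1, h2⟩ := loop_eq chi n [] 0 0 0 (by simp) rfl
  simp only [h1, h2, List.sum_replicate, nsmul_eq_mul]
  have : ((n.toNat : Int)) * 2 = 2 * max n 0 := by omega
  rw [this]
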